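-- pv_equiv track=rewrite | github.com/abdulmoiz248/Rewise | helpers/__init__.py | parse_mcqs
-- ===== SOURCE A (Python) =====
-- from typing import List, Dict, Any, Optional, Tuple
--
-- def parse_mcqs(text: str) -> Tuple[str, str]:
--     """
--     Parse MCQs to separate questions from answers.
--
--     Returns:
--         (questions_only, full_with_answers)
--     """
--     lines = text.split("\n")
--     questions_lines = []
--     full_lines = []
--
--     skip_next = False
--     for line in lines:
--         full_lines.append(line)
--
--         # Skip answer and explanation lines for Discord
--         if skip_next:
--             if line.strip().startswith(("Explanation:", "Explanation -")):
--                 skip_next = False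
--             continue
--
--         if line.strip().startswith(("Answer:", "Answer -", "Correct Answer:")):
--             skip_next = True
--             continue
--
--         questions_lines.append(line)
--
--     return "\n".join(questions_lines), "\n".join(full_lines)
-- ===== SOURCE B (Python) =====
-- def parse_mcqs(text: str):
--     """
--     Parse MCQs to separate questions from answers.
--
--     Returns:
--         (questions_only, full_with_answers)
--     """
--     lines = text.split("\n")
--     questions = []
--     n = len(lines)
--     i = 0
--     while i < n:
--         if lines[i].strip().startswith(("Answer:", "Answer -", "Correct Answer:")):
--             # consume until (and including) the next Explanation line
--             i += 1
--             while i < n and not lines[i].strip().startswith(("Explanation:", "Explanation -")):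
--                 i += 1
--             i += 1
--         else:
--             questions.append(lines[i])
--             i += 1
--     return "\n".join(questions), text
-- ===== Notes on version B (the rewrite author's own statement) =====
-- stated objective: simpler
-- what changed: B drops the skip_next flag and the full_lines accumulator: it returns text itself as the full version and uses a nested consume-loop (advance past answer lines until the terminating Explanation line) to build the questions list.
import Mathlib
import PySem

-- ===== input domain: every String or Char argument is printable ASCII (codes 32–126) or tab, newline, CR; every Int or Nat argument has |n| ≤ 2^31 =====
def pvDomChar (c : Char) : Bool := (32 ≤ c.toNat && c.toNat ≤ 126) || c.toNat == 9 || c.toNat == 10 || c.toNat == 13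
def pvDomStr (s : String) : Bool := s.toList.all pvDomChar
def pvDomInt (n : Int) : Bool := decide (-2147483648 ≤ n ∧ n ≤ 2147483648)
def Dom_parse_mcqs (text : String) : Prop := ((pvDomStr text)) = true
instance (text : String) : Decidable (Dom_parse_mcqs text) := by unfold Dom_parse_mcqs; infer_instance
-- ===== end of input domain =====

-- B is simpler: it returns text itself as the full-with-answers output and replaces the
-- skip_next flag + full_lines accumulator with a nested consume-loop over the lines.


-- ===== PORT A =====
-- line.strip().startswith(("Answer:", "Answer -", "Correct Answer:"))
def pvIsAns (l : String) : Bool :=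
  PySem.Str.startswith (PySem.Str.strip l) "Answer:" ||
  PySem.Str.startswith (PySem.Str.strip l) "Answer -" ||
  PySem.Str.startswith (PySem.Str.strip l) "Correct Answer:"

-- line.strip().startswith(("Explanation:", "Explanation -"))
def pvIsExp (l : String) : Bool :=
  PySem.Str.startswith (PySem.Str.strip l) "Explanation:" ||
  PySem.Str.startswith (PySem.Str.strip l) "Explanation -"

-- the loop body of A: state = (questions_lines, full_lines, skip_next)
def pvStepA (st : List String × List String × Bool) (line : String) :
    List String × List String × Bool :=
  let full := st.2.1 ++ [line]
  if st.2.2 then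
    if pvIsExp line then (st.1, full, false) else (st.1, full, true)
  else if pvIsAns line then (st.1, full, true)
  else (st.1 ++ [line], full, false)

def parse_mcqs (text : String) : String × String :=
  let lines := (PySem.Str.split? text "\n").getD []
  let st := lines.foldl pvStepA ([], [], false)
  (PySem.Str.join "\n" st.1, PySem.Str.join "\n" st.2.1)

-- ===== PORT B =====
-- the inner while-loop of B: advance past lines until one whose strip() starts with an
-- Explanation prefix (dropped too) or the end of the list
def pvDropAns : List String → List String
  | [] => []
  | l :: rest => if pvIsExp l then rest else pvDropAns rest

theorem pvDropAns_length_le (xs : List String) : (pvDropAns xs).length ≤ xs.length := by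
  induction xs with
  | nil => simp [pvDropAns]
  | cons l rest ih =>
    simp only [pvDropAns]
    split
    · simp
    · exact le_trans ih (by simp)

-- the outer while-loop of B, collecting the question lines
def pvQuestions : List String → List String
  | [] => []
  | l :: rest =>
    if pvIsAns l then pvQuestions (pvDropAns rest) else l :: pvQuestions rest
termination_by xs => xs.length
decreasing_by
  · exact Nat.lt_succ_of_le (pvDropAns_length_le rest)
  · simp

def parse_mcqs_alt (text : String) : String × String :=
  let lines := (PySem.Str.split? text "\n").getD []
  (PySem.Str.join "\n" (pvQuestions lines), text)

-- ===== PRECONDITION & SPEC =====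
def Spec_parse_mcqs (text : String) (out : String × String) : Prop := out = parse_mcqs_alt text
instance (text : String) (out : String × String) : Decidable (Spec_parse_mcqs text out) := by unfold Spec_parse_mcqs; infer_instance

-- ===== CLAIM (what is proved, stated in full; the proofs are below) =====
def Claim_equal_parse_mcqs : Prop := ∀ (text : String), Dom_parse_mcqs text → Spec_parse_mcqs text (parse_mcqs text)

-- ===== LEMMAS AND PROOFS =====

-- splitOn.go only appends onto acc
theorem pvGo_acc (sep : List Char) (fuel : Nat) :
    ∀ (l cur : List Char) (acc : List (List Char)),
      PySem.Chars.splitOn.go sep fuel l cur acc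
        = acc.reverse ++ PySem.Chars.splitOn.go sep fuel l cur [] := by
  induction fuel with
  | zero => intro l cur acc; simp [PySem.Chars.splitOn.go]
  | succ fuel ih =>
    intro l cur acc
    cases l with
    | nil => simp [PySem.Chars.splitOn.go]
    | cons c rest =>
      simp only [PySem.Chars.splitOn.go]
      split
      · rw [ih _ _ (cur.reverse :: acc), ih _ _ [cur.reverse]]
        simp
      · exact ih _ _ _

theorem pvGo_ne_nil (sep : List Char) (fuel : Nat) :
    ∀ (l cur : List Char) (acc : List (List Char)),
      PySem.Chars.splitOn.go sep fuel l cur acc ≠ [] := by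
  induction fuel with
  | zero => intro l cur acc; simp [PySem.Chars.splitOn.go]
  | succ fuel ih =>
    intro l cur acc
    cases l with
    | nil => simp [PySem.Chars.splitOn.go]
    | cons c rest =>
      simp only [PySem.Chars.splitOn.go]
      split
      · exact ih _ _ _
      · exact ih _ _ _

-- joining the pieces of a single-char split with that char restores the input
theorem pvGo_join (c : Char) (fuel : Nat) :
    ∀ (l cur : List Char),
      PySem.Chars.join [c] (PySem.Chars.splitOn.go [c] fuel l cur [])
        = cur.reverse ++ l := by
  induction fuel with
  | zero =>
    intro l cur
    simp [PySem.Chars.splitOn.go, PySem.Chars.join_singleton]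
  | succ fuel ih =>
    intro l cur
    cases l with
    | nil => simp [PySem.Chars.splitOn.go, PySem.Chars.join_singleton]
    | cons c' rest =>
      simp only [PySem.Chars.splitOn.go]
      split
      · rename_i hpre
        have hc : c = c' := by
          simpa [List.isPrefixOf] using hpre
        rw [pvGo_acc]
        obtain ⟨p, ps, hps⟩ := List.exists_cons_of_ne_nil (pvGo_ne_nil [c] fuel rest [] [])
        simp only [List.reverse_cons, List.reverse_nil, List.nil_append, List.singleton_append,
          List.length_cons, List.length_nil, List.drop_succ_cons, List.drop_zero, Nat.zero_add]
        rw [hps, PySem.Chars.join_cons_cons, ← hps, ih]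
        simp [hc]
      · rw [ih]
        simp

theorem pvJoin_splitOn (cs : List Char) (c : Char) :
    PySem.Chars.join [c] (PySem.Chars.splitOn cs [c]) = cs := by
  unfold PySem.Chars.splitOn
  simpa using pvGo_join c (cs.length + 1) cs []

-- the full_lines accumulator of A collects every line
theorem pvFoldA_full (lines : List String) :
    ∀ (q f : List String) (s : Bool),
      (lines.foldl pvStepA (q, f, s)).2.1 = f ++ lines := by
  induction lines with
  | nil => intro q f s; simp
  | cons l rest ih =>
    intro q f s
    simp only [List.foldl_cons, pvStepA]
    split_ifs <;> simp [ih]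

-- A's questions accumulator computes B's pvQuestions (skip_next=true ↔ a pvDropAns prefix)
theorem pvFoldA_questions (lines : List String) :
    ∀ (q f : List String),
      (lines.foldl pvStepA (q, f, false)).1 = q ++ pvQuestions lines
      ∧ (lines.foldl pvStepA (q, f, true)).1 = q ++ pvQuestions (pvDropAns lines) := by
  induction lines with
  | nil => intro q f; simp [pvQuestions, pvDropAns]
  | cons l rest ih =>
    intro q f
    constructor
    · simp only [List.foldl_cons, pvStepA]
      by_cases ha : pvIsAns l
      · simp only [ha, if_true, if_false, Bool.false_eq_true]
        rw [pvQuestions, if_pos ha]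
        exact (ih q _).2
      · simp only [ha, if_false, Bool.false_eq_true]
        rw [pvQuestions, if_neg ha]
        rw [(ih (q ++ [l]) _).1]
        simp
    · simp only [List.foldl_cons, pvStepA]
      by_cases he : pvIsExp l
      · simp only [he, if_true]
        rw [pvDropAns, if_pos he]
        exact (ih q _).1
      · simp only [he]
        rw [pvDropAns, if_neg he]
        exact (ih q _).2

-- joining A's lines list with "\n" restores text
theorem pvJoin_lines (text : String) :
    PySem.Str.join "\n" ((PySem.Str.split? text "\n").getD []) = text := by
  simp only [PySem.Str.split?, PySem.Str.join, PySem.Chars.split?]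
  simp only [show ("\n" : String).toList = ['\n'] from rfl]
  simp only [List.isEmpty_cons, if_false, Bool.false_eq_true, Option.map_some, Option.getD_some]
  rw [List.map_map]
  have : (String.toList ∘ String.ofList) = id := by
    funext l; simp
  rw [this, List.map_id, pvJoin_splitOn, String.ofList_toList]

-- ===== VERDICT (by name: the statement is the Claim_ definition above) =====
theorem parse_mcqs_spec : Claim_equal_parse_mcqs := by
  intro text _
  unfold Spec_parse_mcqs parse_mcqs parse_mcqs_alt
  simp only []
  refine Prod.ext ?_ ?_
  · simp only
    rw [(pvFoldA_questions _ [] []).1]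
    simp
  · simp only
    rw [pvFoldA_full]
    simpa using pvJoin_lines text
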